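-- pv_equiv track=rewrite | github.com/johnatas-henrique/opencode-config | scripts/normalize-model-names.py | format_modalities
-- ===== SOURCE A (Python) =====
-- def format_modalities(modalities: dict) -> str:
--     """Format modalities to CAPS string in fixed order: IMAGE/AUDIO/PDF/VIDEO"""
--     input_mods = modalities.get('input', ['text'])
--     output_mods = modalities.get('output', ['text'])
--     all_mods = set(input_mods + output_mods)
--
--     non_text = [m.upper() for m in all_mods if m != 'text']
--
--     preferred_order = ['IMAGE', 'AUDIO', 'PDF', 'VIDEO']
--
--     ordered_mods = [mod for mod in preferred_order if mod in non_text]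
--
--     other_mods = sorted([mod for mod in non_text if mod not in preferred_order])
--     ordered_mods.extend(other_mods)
--
--     if ordered_mods:
--         return f" | [{'/'.join(ordered_mods)}]"
--     return ""
-- ===== SOURCE B (Python) =====
-- def format_modalities(modalities: dict) -> str:
--     """Format modalities to CAPS string in fixed order: IMAGE/AUDIO/PDF/VIDEO"""
--     preferred = ['IMAGE', 'AUDIO', 'PDF', 'VIDEO']
--     mods = modalities.get('input', ['text']) + modalities.get('output', ['text'])
--     ups = {m.upper() for m in mods if m != 'text'}
--     ordered = sorted(ups, key=lambda m: (preferred.index(m) if m in preferred else len(preferred), m))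
--     if ordered:
--         return " | [" + "/".join(ordered) + "]"
--     return ""
-- ===== Notes on version B (the rewrite author's own statement) =====
-- stated objective: idiomatic
-- what changed: A's two-phase partition (comprehension over the preferred order plus a separately sorted remainder, over a list of uppercased set elements) is replaced by one sorted() call over the set of uppercased non-text modalities with a composite key (rank in the preferred list, then the string itself).
-- intended difference: On inputs whose modality lists contain two distinct non-'text' strings with the same uppercase form outside IMAGE/AUDIO/PDF/VIDEO (e.g. 'foo' and 'Foo'), A prints that uppercase form once per distinct original (' | [FOO/FOO]') while B, deduplicating after uppercasing as it does for the preferred names, prints it once (' | [FOO]'), the intended output for a formatted tag list. — e.g. on format_modalities([("input", ["foo", "Foo"])]): A returns " | [FOO/FOO]", B returns " | [FOO]"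
import Mathlib
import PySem

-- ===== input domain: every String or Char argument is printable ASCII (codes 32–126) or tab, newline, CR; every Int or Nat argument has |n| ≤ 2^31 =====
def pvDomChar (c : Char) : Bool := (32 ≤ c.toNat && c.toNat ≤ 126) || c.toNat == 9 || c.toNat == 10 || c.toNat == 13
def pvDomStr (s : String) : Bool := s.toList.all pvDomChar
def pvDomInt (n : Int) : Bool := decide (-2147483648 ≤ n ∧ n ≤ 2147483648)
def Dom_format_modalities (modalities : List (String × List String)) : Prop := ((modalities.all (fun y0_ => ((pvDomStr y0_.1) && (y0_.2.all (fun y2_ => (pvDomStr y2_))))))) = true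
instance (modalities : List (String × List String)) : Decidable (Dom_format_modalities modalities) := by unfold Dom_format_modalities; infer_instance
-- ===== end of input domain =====

-- B replaces A's two-phase partition (preferred-order comprehension + separately sorted rest) by ONE
-- sorted() call over the set of uppercased non-text modalities with a composite key (rank in the
-- preferred list, then the string itself); objective: idiomatic.

-- ===== PORT A =====
def format_modalities (modalities : List (String × List String)) : String :=
  let d := PySem.Dict.mk modalities
  let input_mods := d.getD "input" ["text"]
  let output_mods := d.getD "output" ["text"]
  let all_mods : PySem.Set String := PySem.Set.ofList (input_mods ++ output_mods)
  -- iterating the set: the distinct elements; every later use is order-insensitive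
  let non_text : List String := (all_mods.filter (fun m => decide (m ≠ "text"))).map PySem.Str.upper
  let preferred_order : List String := ["IMAGE", "AUDIO", "PDF", "VIDEO"]
  let ordered_mods := preferred_order.filter (fun mod => decide (mod ∈ non_text))
  let other_mods := PySem.List.sorted (non_text.filter (fun mod => decide (mod ∉ preferred_order))) (fun x => x) false
  let ordered_mods := ordered_mods ++ other_mods
  if ordered_mods ≠ [] then " | [" ++ PySem.Str.join "/" ordered_mods ++ "]" else ""

-- ===== PORT B =====
-- the composite sort key (preferred.index(m) if m in preferred else len(preferred), m): first component
def pvRank (m : String) : Int :=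
  match PySem.List.index? ["IMAGE", "AUDIO", "PDF", "VIDEO"] m with
  | some i => (i : Int)
  | none => (["IMAGE", "AUDIO", "PDF", "VIDEO"] : List String).length

def format_modalities_alt (modalities : List (String × List String)) : String :=
  let d := PySem.Dict.mk modalities
  let mods := d.getD "input" ["text"] ++ d.getD "output" ["text"]
  let ups : PySem.Set String := PySem.Set.ofList ((mods.filter (fun m => decide (m ≠ "text"))).map PySem.Str.upper)
  let ordered := PySem.List.sorted2 ups pvRank (fun m => m) false
  if ordered ≠ [] then " | [" ++ PySem.Str.join "/" ordered ++ "]" else ""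

-- ===== PRECONDITION & SPEC =====
-- the concatenated input+output modality lists (with their ['text'] defaults), as A reads them
def pvMods (modalities : List (String × List String)) : List String :=
  (PySem.Dict.mk modalities).getD "input" ["text"] ++ (PySem.Dict.mk modalities).getD "output" ["text"]

-- On inputs whose modality lists contain two DISTINCT non-'text' strings with the same uppercase form
-- outside IMAGE/AUDIO/PDF/VIDEO (e.g. 'foo' and 'Foo'), A emits that uppercase form once per original
-- (" | [FOO/FOO]") while B, deduplicating after uppercasing, emits it once (" | [FOO]"), which is the
-- intended output for a formatted modality tag list.
def D_format_modalities (modalities : List (String × List String)) : Prop :=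
  ∃ a ∈ pvMods modalities, ∃ b ∈ pvMods modalities,
    a ≠ b ∧ a ≠ "text" ∧ b ≠ "text" ∧ PySem.Str.upper a = PySem.Str.upper b ∧
    PySem.Str.upper a ∉ (["IMAGE", "AUDIO", "PDF", "VIDEO"] : List String)
instance (modalities : List (String × List String)) : Decidable (D_format_modalities modalities) := by
  unfold D_format_modalities; infer_instance

def Spec_format_modalities (modalities : List (String × List String)) (out : String) : Prop :=
  ¬ D_format_modalities modalities → out = format_modalities_alt modalities
instance (modalities : List (String × List String)) (out : String) : Decidable (Spec_format_modalities modalities out) := by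
  unfold Spec_format_modalities; infer_instance

def pvDiffWitness_format_modalities : (List (String × List String)) := [("input", ["foo", "Foo"])]
def pvDiffWitnessOut_format_modalities : String × String := (" | [FOO/FOO]", " | [FOO]")

-- ===== CLAIM (what is proved, stated in full; the proofs are below) =====
def Claim_unchanged_format_modalities : Prop := ∀ (modalities : List (String × List String)), Dom_format_modalities modalities → Spec_format_modalities modalities (format_modalities modalities)
def Claim_changed_format_modalities : Prop := Dom_format_modalities (pvDiffWitness_format_modalities) ∧ D_format_modalities (pvDiffWitness_format_modalities) ∧ format_modalities (pvDiffWitness_format_modalities) = pvDiffWitnessOut_format_modalities.1 ∧ format_modalities_alt (pvDiffWitness_format_modalities) = pvDiffWitnessOut_format_modalities.2 ∧ pvDiffWitnessOut_format_modalities.1 ≠ pvDiffWitnessOut_format_modalities.2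
def Claim_exact_format_modalities : Prop := ∀ (modalities : List (String × List String)), Dom_format_modalities modalities → D_format_modalities modalities → format_modalities modalities ≠ format_modalities_alt modalities

-- ===== LEMMAS AND PROOFS =====

theorem pv_insertBy_congr {α : Type} (f g : α → α → Bool) (h : ∀ a b, f a b = g a b)
    (x : α) (l : List α) : PySem.List.insertBy f x l = PySem.List.insertBy g x l := by
  induction l with
  | nil => rfl
  | cons y ys ih => simp only [PySem.List.insertBy, h]; split <;> simp [ih]

theorem pv_foldl_insertBy_congr {α : Type} (f g : α → α → Bool) (h : ∀ a b, f a b = g a b)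
    (xs acc : List α) :
    xs.foldl (fun acc x => PySem.List.insertBy f x acc) acc
      = xs.foldl (fun acc x => PySem.List.insertBy g x acc) acc := by
  induction xs generalizing acc with
  | nil => rfl
  | cons y ys ih => simp only [List.foldl_cons, pv_insertBy_congr f g h]

-- the composite key as one lexicographic key
def pvKey (m : String) : Lex (Int × String) := toLex (pvRank m, m)

theorem pv_sorted2_eq_sorted_lex (xs : List String) :
    PySem.List.sorted2 xs pvRank (fun m => m) false = PySem.List.sorted xs pvKey false := by
  simp only [PySem.List.sorted2, PySem.List.sorted, if_neg (by decide : ¬ (false = true))]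
  apply pv_foldl_insertBy_congr
  intro a b
  rcases lt_trichotomy (pvRank a) (pvRank b) with h | h | h
  · simp [pvKey, Prod.Lex.lt_iff, h]
  · simp [pvKey, Prod.Lex.lt_iff, h]
  · have h1 : ¬ pvRank a < pvRank b := asymm h
    have h2 : pvRank a ≠ pvRank b := ne_of_gt h
    simp [pvKey, Prod.Lex.lt_iff, h, h1, h2]

theorem pv_rank_lt_of_mem {m : String}
    (h : m ∈ (["IMAGE", "AUDIO", "PDF", "VIDEO"] : List String)) : pvRank m < 4 := by
  simp only [List.mem_cons, List.not_mem_nil, or_false] at h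
  rcases h with h | h | h | h <;> subst h <;> decide

theorem pv_rank_eq_of_not_mem {m : String}
    (h : m ∉ (["IMAGE", "AUDIO", "PDF", "VIDEO"] : List String)) : pvRank m = 4 := by
  unfold pvRank
  rw [(PySem.List.index?_eq_none_iff _ _).mpr h]
  decide

-- A's uppercased-set list and B's set-of-uppercased list have the same members
theorem pv_mem_NT_iff (L : List String) (x : String) :
    (x ∈ ((PySem.Set.ofList L).filter (fun m => decide (m ≠ "text"))).map PySem.Str.upper)
      ↔ x ∈ (PySem.Set.ofList ((L.filter (fun m => decide (m ≠ "text"))).map PySem.Str.upper) : List String) := by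
  simp only [List.mem_map, List.mem_filter, PySem.Set.mem_ofList, decide_eq_true_eq]


-- no collision ⇒ A's non-preferred block has no duplicates
theorem pv_nodup_others (L : List String)
    (hnD : ¬ (∃ a ∈ L, ∃ b ∈ L, a ≠ b ∧ a ≠ "text" ∧ b ≠ "text" ∧
        PySem.Str.upper a = PySem.Str.upper b ∧
        PySem.Str.upper a ∉ (["IMAGE", "AUDIO", "PDF", "VIDEO"] : List String))) :
    ((((PySem.Set.ofList L).filter (fun m => decide (m ≠ "text"))).map PySem.Str.upper).filter
        (fun mod => decide (mod ∉ (["IMAGE", "AUDIO", "PDF", "VIDEO"] : List String)))).Nodup := by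
  rw [List.filter_map]
  apply List.Nodup.map_on
  · intro a ha b hb hab
    simp only [List.mem_filter, Function.comp, PySem.Set.mem_ofList, decide_eq_true_eq] at ha hb
    by_contra hne
    exact hnD ⟨a, ha.1.1, b, hb.1.1, hne, ha.1.2, hb.1.2, hab, hab ▸ ha.2⟩
  · exact ((PySem.Set.nodup_ofList L).filter _).filter _

-- the central identity: B's single key-sort equals A's partition
theorem pv_sorted_key_eq (L : List String)
    (hnD : ¬ (∃ a ∈ L, ∃ b ∈ L, a ≠ b ∧ a ≠ "text" ∧ b ≠ "text" ∧
        PySem.Str.upper a = PySem.Str.upper b ∧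
        PySem.Str.upper a ∉ (["IMAGE", "AUDIO", "PDF", "VIDEO"] : List String))) :
    PySem.List.sorted
        (PySem.Set.ofList ((L.filter (fun m => decide (m ≠ "text"))).map PySem.Str.upper) : List String)
        pvKey false
      = (["IMAGE", "AUDIO", "PDF", "VIDEO"] : List String).filter
          (fun mod => decide (mod ∈ ((PySem.Set.ofList L).filter (fun m => decide (m ≠ "text"))).map PySem.Str.upper))
        ++ PySem.List.sorted
            ((((PySem.Set.ofList L).filter (fun m => decide (m ≠ "text"))).map PySem.Str.upper).filter
              (fun mod => decide (mod ∉ (["IMAGE", "AUDIO", "PDF", "VIDEO"] : List String))))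
            (fun x => x) false := by
  set pref : List String := ["IMAGE", "AUDIO", "PDF", "VIDEO"] with hpref
  set NT : List String := ((PySem.Set.ofList L).filter (fun m => decide (m ≠ "text"))).map PySem.Str.upper with hNT
  set U : List String := (PySem.Set.ofList ((L.filter (fun m => decide (m ≠ "text"))).map PySem.Str.upper) : List String) with hU
  set P : List String := pref.filter (fun mod => decide (mod ∈ NT)) with hP
  set O : List String := PySem.List.sorted (NT.filter (fun mod => decide (mod ∉ pref))) (fun x => x) false with hO
  have hOthersNodup : (NT.filter (fun mod => decide (mod ∉ pref))).Nodup := pv_nodup_others L hnD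
  have hOnodup : O.Nodup := (PySem.List.sorted_perm _ _ _).symm.nodup hOthersNodup
  have hPnodup : P.Nodup := List.Nodup.sublist (List.filter_sublist) (by decide)
  have hmemO : ∀ x, x ∈ O ↔ x ∈ NT ∧ x ∉ pref := by
    intro x
    rw [hO, PySem.List.mem_sorted, List.mem_filter]
    simp
  have hmemP : ∀ x, x ∈ P ↔ x ∈ pref ∧ x ∈ NT := by
    intro x
    rw [hP, List.mem_filter]
    simp
  apply PySem.List.sorted_eq_of_perm_of_pairwise_lt
  · -- (P ++ O).Perm U
    rw [List.perm_ext_iff_of_nodup _ (PySem.Set.nodup_ofList _)]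
    · intro x
      rw [List.mem_append, hmemP x, hmemO x, ← pv_mem_NT_iff L x]
      constructor
      · rintro (⟨_, h⟩ | ⟨h, _⟩) <;> exact h
      · intro h
        by_cases hp : x ∈ pref
        · exact Or.inl ⟨hp, h⟩
        · exact Or.inr ⟨h, hp⟩
    · rw [List.nodup_append]
      refine ⟨hPnodup, hOnodup, ?_⟩
      intro x hx y hy rfl
      exact ((hmemO x).mp hy).2 ((hmemP x).mp hx).1
  · -- Pairwise strictly increasing under pvKey
    rw [List.pairwise_append]
    refine ⟨?_, ?_, ?_⟩
    · exact List.Pairwise.sublist (List.filter_sublist)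
        (by decide : pref.Pairwise (fun a b => pvKey a < pvKey b))
    · have h1 : O.Pairwise (fun a b : String => a ≤ b) := PySem.List.sorted_pairwise _ _
      have h2 : O.Pairwise (fun a b : String => a ≠ b) := hOnodup
      refine (h1.and h2).imp_of_mem ?_
      intro a b ha hb hab
      have hra : pvRank a = 4 := pv_rank_eq_of_not_mem ((hmemO a).mp ha).2
      have hrb : pvRank b = 4 := pv_rank_eq_of_not_mem ((hmemO b).mp hb).2
      simp only [pvKey, Prod.Lex.lt_iff, ofLex_toLex]
      exact Or.inr ⟨by rw [hra, hrb], lt_of_le_of_ne hab.1 hab.2⟩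
    · intro a ha b hb
      have hra : pvRank a < 4 := pv_rank_lt_of_mem ((hmemP a).mp ha).1
      have hrb : pvRank b = 4 := pv_rank_eq_of_not_mem ((hmemO b).mp hb).2
      simp only [pvKey, Prod.Lex.lt_iff, ofLex_toLex]
      exact Or.inl (by omega)


-- evaluation of port A at the difference witness (the String-< instance does not kernel-reduce,
-- so the sort of ["FOO", "FOO"] is discharged by sorted_eq_self_of_pairwise instead of decide)
theorem pv_witness_A_eval :
    format_modalities [("input", ["foo", "Foo"])] = " | [FOO/FOO]" := by
  show (if _ ≠ ([] : List String) then _ else "") = _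
  rw [show (((PySem.Set.ofList ((PySem.Dict.mk [("input", ["foo", "Foo"])]).getD "input" ["text"]
        ++ (PySem.Dict.mk [("input", ["foo", "Foo"])]).getD "output" ["text"])).filter
        (fun m => decide (m ≠ "text"))).map PySem.Str.upper) = (["FOO", "FOO"] : List String)
      from by decide]
  rw [show ((["IMAGE", "AUDIO", "PDF", "VIDEO"] : List String).filter
        (fun mod => decide (mod ∈ (["FOO", "FOO"] : List String)))) = ([] : List String)
      from by decide]
  rw [show ((["FOO", "FOO"] : List String).filter
        (fun mod => decide (mod ∉ (["IMAGE", "AUDIO", "PDF", "VIDEO"] : List String))))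
        = (["FOO", "FOO"] : List String)
      from by decide]
  rw [PySem.List.sorted_eq_self_of_pairwise _ _ (by simp : List.Pairwise (fun a b : String => a ≤ b) ["FOO", "FOO"])]
  decide


-- ===== tightness: A ≠ B everywhere inside D_ (a duplicated entry makes A's string strictly longer) =====

theorem pv_join_len (ps : List (List Char)) (h : ps ≠ []) :
    (PySem.Chars.join ['/'] ps).length + 1 = (ps.map (fun p => p.length + 1)).sum := by
  induction ps with
  | nil => exact absurd rfl h
  | cons p rest ih =>
    cases rest with
    | nil => simp [PySem.Chars.join_singleton]
    | cons q rest' =>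
      rw [PySem.Chars.join_cons_cons]
      have hih := ih (by simp)
      simp only [List.map_cons, List.sum_cons, List.length_append, List.length_cons,
        List.length_nil] at hih ⊢
      omega

theorem pv_out_toList_len (l : List String) (h : l ≠ []) :
    (" | [" ++ PySem.Str.join "/" l ++ "]").toList.length
      = (l.map (fun s => s.toList.length + 1)).sum + 4 := by
  rw [String.toList_append, String.toList_append, PySem.Str.toList_join]
  rw [show ("/" : String).toList = ['/'] from by decide]
  simp only [List.length_append]
  have hj := pv_join_len (l.map String.toList) (by simpa using h)
  rw [show (" | [" : String).toList.length = 4 from by decide,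
      show ("]" : String).toList.length = 1 from by decide]
  rw [show (l.map (fun s => s.toList.length + 1)) = (l.map String.toList).map (fun p => p.length + 1)
      from by rw [List.map_map]; rfl]
  omega

theorem pv_sum_w_le (w : String → ℕ) {l₁ l₂ : List String} (h : l₁.Subperm l₂) :
    (l₁.map w).sum ≤ (l₂.map w).sum := by
  obtain ⟨t, hp, hs⟩ := h
  rw [← (hp.map w).sum_eq]
  exact List.Sublist.sum_le_sum (hs.map w) (fun a _ => Nat.zero_le a)

theorem pv_tight_main (L : List String)
    (hD : ∃ a ∈ L, ∃ b ∈ L, a ≠ b ∧ a ≠ "text" ∧ b ≠ "text" ∧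
        PySem.Str.upper a = PySem.Str.upper b ∧
        PySem.Str.upper a ∉ (["IMAGE", "AUDIO", "PDF", "VIDEO"] : List String)) :
    (if ((["IMAGE", "AUDIO", "PDF", "VIDEO"] : List String).filter
          (fun mod => decide (mod ∈ ((PySem.Set.ofList L).filter (fun m => decide (m ≠ "text"))).map PySem.Str.upper))
        ++ PySem.List.sorted
            ((((PySem.Set.ofList L).filter (fun m => decide (m ≠ "text"))).map PySem.Str.upper).filter
              (fun mod => decide (mod ∉ (["IMAGE", "AUDIO", "PDF", "VIDEO"] : List String))))
            (fun x => x) false) ≠ [] then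
      " | [" ++ PySem.Str.join "/"
        ((["IMAGE", "AUDIO", "PDF", "VIDEO"] : List String).filter
          (fun mod => decide (mod ∈ ((PySem.Set.ofList L).filter (fun m => decide (m ≠ "text"))).map PySem.Str.upper))
        ++ PySem.List.sorted
            ((((PySem.Set.ofList L).filter (fun m => decide (m ≠ "text"))).map PySem.Str.upper).filter
              (fun mod => decide (mod ∉ (["IMAGE", "AUDIO", "PDF", "VIDEO"] : List String))))
            (fun x => x) false) ++ "]" else "")
    ≠ (if (PySem.List.sorted2
          (PySem.Set.ofList ((L.filter (fun m => decide (m ≠ "text"))).map PySem.Str.upper) : List String)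
          pvRank (fun m => m) false) ≠ [] then
      " | [" ++ PySem.Str.join "/"
        (PySem.List.sorted2
          (PySem.Set.ofList ((L.filter (fun m => decide (m ≠ "text"))).map PySem.Str.upper) : List String)
          pvRank (fun m => m) false) ++ "]" else "") := by
  obtain ⟨a, haL, b, hbL, hab, hat, hbt, hu, hup⟩ := hD
  rw [pv_sorted2_eq_sorted_lex]
  set pref : List String := ["IMAGE", "AUDIO", "PDF", "VIDEO"] with hpref
  set u : String := PySem.Str.upper a with hudef
  set S' : List String := (PySem.Set.ofList L).filter (fun m => decide (m ≠ "text")) with hS'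
  set NT : List String := S'.map PySem.Str.upper with hNT
  set F : List String := NT.filter (fun mod => decide (mod ∉ pref)) with hF
  set P : List String := pref.filter (fun mod => decide (mod ∈ NT)) with hP
  set U : List String := (PySem.Set.ofList ((L.filter (fun m => decide (m ≠ "text"))).map PySem.Str.upper) : List String) with hU
  set OA : List String := PySem.List.sorted F (fun x => x) false with hOA
  set LB : List String := PySem.List.sorted U pvKey false with hLB
  have haS : a ∈ S' := List.mem_filter.mpr ⟨(PySem.Set.mem_ofList L a).mpr haL, by simp [hat]⟩
  have hbS : b ∈ S' := List.mem_filter.mpr ⟨(PySem.Set.mem_ofList L b).mpr hbL, by simp [hbt]⟩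
  have hperm : S'.Perm (a :: b :: ((S'.erase a).erase b)) := by
    refine (List.perm_cons_erase haS).trans (List.Perm.cons a ?_)
    exact List.perm_cons_erase (List.mem_erase_of_ne (Ne.symm hab) |>.mpr hbS)
  have hNTperm : NT.Perm (u :: u :: (((S'.erase a).erase b).map PySem.Str.upper)) := by
    have := hperm.map PySem.Str.upper
    simpa [← hu, ← hudef] using this
  have hcountNT : 2 ≤ NT.count u := by
    rw [hNTperm.count_eq]
    simp
  have huNT : u ∈ NT := List.mem_map.mpr ⟨a, haS, rfl⟩
  have huU : u ∈ U := (pv_mem_NT_iff L u).mp huNT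
  have hUnodup : U.Nodup := PySem.Set.nodup_ofList _
  have hcountF : 2 ≤ F.count u := by
    rw [hF, List.count_filter (by simp [hup])]
    exact hcountNT
  have huP : u ∉ P := fun h => hup (List.mem_filter.mp h).1
  have hmemPF : ∀ x, x ∈ U → x ∈ P ++ F := by
    intro x hx
    have hxNT : x ∈ NT := (pv_mem_NT_iff L x).mpr hx
    by_cases hp : x ∈ pref
    · exact List.mem_append_left _ (List.mem_filter.mpr ⟨hp, by simp [hxNT]⟩)
    · exact List.mem_append_right _ (List.mem_filter.mpr ⟨hxNT, by simp [hp]⟩)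
  have hsub : (u :: U).Subperm (P ++ F) := by
    rw [List.subperm_ext_iff]
    intro x hx
    have hcPF : List.count u (P ++ F) = List.count u F := by
      rw [List.count_append, List.count_eq_zero.mpr huP, Nat.zero_add]
    by_cases hxu : x = u
    · subst hxu
      have h1 : List.count u U ≤ 1 := List.nodup_iff_count_le_one.mp hUnodup u
      rw [List.count_cons_self]
      omega
    · have h1 : List.count x (u :: U) = List.count x U := by simp [Ne.symm hxu]
      have hxU : x ∈ U := by
        rcases List.mem_cons.mp hx with h | h
        · exact absurd h hxu
        · exact h
      have h2 : List.count x U ≤ 1 := List.nodup_iff_count_le_one.mp hUnodup x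
      have h3 : 0 < List.count x (P ++ F) := List.count_pos_iff.mpr (hmemPF x hxU)
      omega
  have hWle : ((u :: U).map (fun s => s.toList.length + 1)).sum
      ≤ ((P ++ F).map (fun s => s.toList.length + 1)).sum := pv_sum_w_le _ hsub
  have hWlt : (U.map (fun s => s.toList.length + 1)).sum
      < ((P ++ F).map (fun s => s.toList.length + 1)).sum := by
    simp only [List.map_cons, List.sum_cons] at hWle
    omega
  have hWLA : ((P ++ OA).map (fun s => s.toList.length + 1)).sum
      = ((P ++ F).map (fun s => s.toList.length + 1)).sum := by
    have hOAperm : OA.Perm F := by rw [hOA]; exact PySem.List.sorted_perm _ _ _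
    simp only [List.map_append, List.sum_append]
    have := (hOAperm.map (fun s : String => s.toList.length + 1)).sum_eq
    omega
  have hLBperm : LB.Perm U := by rw [hLB]; exact PySem.List.sorted_perm _ _ _
  have hWLB : (LB.map (fun s => s.toList.length + 1)).sum
      = (U.map (fun s => s.toList.length + 1)).sum :=
    (hLBperm.map (fun s : String => s.toList.length + 1)).sum_eq
  have huOA : u ∈ OA := by
    rw [hOA, PySem.List.mem_sorted]
    exact List.mem_filter.mpr ⟨huNT, by simp [hup]⟩
  have hLAne : (P ++ OA) ≠ [] := List.ne_nil_of_mem (List.mem_append_right _ huOA)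
  have hLBne : LB ≠ [] := List.ne_nil_of_mem ((PySem.List.mem_sorted _ _ _ _).mpr huU)
  rw [if_pos hLAne, if_pos hLBne]
  intro heq
  have hlen := congrArg (fun s : String => s.toList.length) heq
  simp only [] at hlen
  rw [pv_out_toList_len _ hLAne, pv_out_toList_len _ hLBne] at hlen
  omega

-- ===== VERDICT (by name: the statement is the Claim_ definition above) =====
theorem format_modalities_spec : Claim_unchanged_format_modalities := by
  intro modalities _hdom hnD
  show (if _ ≠ ([] : List String) then _ else "") = (if _ ≠ ([] : List String) then _ else "")
  have hnD' : ¬ (∃ a ∈ pvMods modalities, ∃ b ∈ pvMods modalities,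
      a ≠ b ∧ a ≠ "text" ∧ b ≠ "text" ∧ PySem.Str.upper a = PySem.Str.upper b ∧
      PySem.Str.upper a ∉ (["IMAGE", "AUDIO", "PDF", "VIDEO"] : List String)) := hnD
  rw [pv_sorted2_eq_sorted_lex, pv_sorted_key_eq ((PySem.Dict.mk modalities).getD "input" ["text"]
      ++ (PySem.Dict.mk modalities).getD "output" ["text"]) hnD']

theorem format_modalities_changed : Claim_changed_format_modalities := by
  unfold Claim_changed_format_modalities
  refine ⟨by decide, by decide, pv_witness_A_eval, by decide, by decide⟩

theorem format_modalities_tight : Claim_exact_format_modalities := by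
  intro modalities _hdom hD
  exact pv_tight_main ((PySem.Dict.mk modalities).getD "input" ["text"]
    ++ (PySem.Dict.mk modalities).getD "output" ["text"]) hD
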